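-- pv_equiv track=rewrite | github.com/SwintexD/bAUTO | bauto/core/parser.py | group_related_actions
-- ===== SOURCE A (Python) =====
-- from typing import List, Dict, Tuple, Optional
--
-- def group_related_actions(actions: List[str]) -> List[str]:
--     """
--     Group related actions into logical blocks.
--     Actions that should be executed together are combined.
--     """
--     grouped = []
--     current_block = []
--
--     for action in actions:
--         action_lower = action.lower()
--
--         # Check if this is a continuation of previous action
--         is_continuation = any(
--             keyword in action_lower
--             for keyword in ["then", "and", "after that", "next"]
--         )
--
--         if is_continuation and current_block:
--             current_block.append(action)
--         else:
--             # Start new block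
--             if current_block:
--                 grouped.append("\n".join(current_block))
--             current_block = [action]
--
--     # Add final block
--     if current_block:
--         grouped.append("\n".join(current_block))
--
--     return grouped
-- ===== SOURCE B (Python) =====
-- from typing import List
--
-- KEYWORDS = ("then", "and", "after that", "next")
--
--
-- def _is_continuation(action: str) -> bool:
--     low = action.lower()
--     return any(k in low for k in KEYWORDS)
--
--
-- def group_related_actions(actions: List[str]) -> List[str]:
--     """Block-at-a-time grouping: each block starts at j, extends over the
--     following run of continuation actions up to i, is joined and emitted,
--     and the scan resumes at i."""
--     out = []
--     n = len(actions)
--     j = 0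
--     while j < n:
--         i = j + 1
--         while i < n and _is_continuation(actions[i]):
--             i += 1
--         out.append("\n".join(actions[j:i]))
--         j = i
--     return out
-- ===== Notes on version B (the rewrite author's own statement) =====
-- stated objective: simpler
-- what changed: Replaces the stateful accumulate-while-scanning loop (grouped list + mutable current block + final flush) with a recursive block-at-a-time decomposition: take the head, extend it by the leading run of continuation actions, emit the joined block, recurse on the remainder.
import Mathlib
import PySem

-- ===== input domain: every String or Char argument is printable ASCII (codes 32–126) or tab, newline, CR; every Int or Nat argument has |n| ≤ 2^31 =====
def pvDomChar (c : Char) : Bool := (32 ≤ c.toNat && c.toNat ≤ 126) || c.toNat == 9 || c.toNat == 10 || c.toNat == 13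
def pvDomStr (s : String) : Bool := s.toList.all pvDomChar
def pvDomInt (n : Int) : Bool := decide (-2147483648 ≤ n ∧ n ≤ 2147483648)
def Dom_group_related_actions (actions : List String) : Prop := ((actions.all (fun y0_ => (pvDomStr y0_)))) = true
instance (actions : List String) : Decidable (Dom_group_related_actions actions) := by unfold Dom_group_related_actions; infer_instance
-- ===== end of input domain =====

-- B replaces A's stateful accumulate-and-flush loop with a recursive block-at-a-time
-- decomposition (head + leading run of continuations, then recurse); same cost, simpler shape.

-- ===== PORT A =====
-- one step of A's for-loop over (grouped, current_block)
def pvStepA (st : List String × List String) (action : String) : List String × List String :=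
  let grouped := st.1
  let current_block := st.2
  let action_lower := PySem.Str.lower action
  let is_continuation :=
    (["then", "and", "after that", "next"]).any (fun keyword => PySem.Str.isIn keyword action_lower)
  if is_continuation && !current_block.isEmpty then
    (grouped, current_block ++ [action])
  else
    let grouped := if !current_block.isEmpty then grouped ++ [PySem.Str.join "\n" current_block] else grouped
    (grouped, [action])

def group_related_actions (actions : List String) : List String :=
  let fin := actions.foldl pvStepA ([], [])
  if !fin.2.isEmpty then fin.1 ++ [PySem.Str.join "\n" fin.2] else fin.1

-- ===== PORT B =====
def pvIsCont (action : String) : Bool :=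
  let low := PySem.Str.lower action
  (["then", "and", "after that", "next"]).any (fun k => PySem.Str.isIn k low)

-- the while-loop scanning i over the leading continuation run, then the slices
-- rest[:i] / rest[i:], are exactly takeWhile / dropWhile of pvIsCont
def group_related_actions_alt (actions : List String) : List String :=
  match actions with
  | [] => []
  | head :: rest =>
      PySem.Str.join "\n" (head :: rest.takeWhile pvIsCont) ::
        group_related_actions_alt (rest.dropWhile pvIsCont)
termination_by actions.length
decreasing_by
  simpa using Nat.lt_succ_of_le (List.length_dropWhile_le pvIsCont rest)

-- ===== PRECONDITION & SPEC =====
def Spec_group_related_actions (actions : List String) (out : List String) : Prop := out = group_related_actions_alt actions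
instance (actions : List String) (out : List String) : Decidable (Spec_group_related_actions actions out) := by unfold Spec_group_related_actions; infer_instance

-- ===== CLAIM (what is proved, stated in full; the proofs are below) =====
def Claim_equal_group_related_actions : Prop := ∀ (actions : List String), Dom_group_related_actions actions → Spec_group_related_actions actions (group_related_actions actions)

-- ===== LEMMAS AND PROOFS =====

theorem pvStepA_eq (g c : List String) (a : String) :
    pvStepA (g, c) a =
      if pvIsCont a && !c.isEmpty then (g, c ++ [a])
      else ((if !c.isEmpty then g ++ [PySem.Str.join "\n" c] else g), [a]) := rfl

theorem pvAlt_cons (a : String) (rest : List String) :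
    group_related_actions_alt (a :: rest) =
      PySem.Str.join "\n" (a :: rest.takeWhile pvIsCont) ::
        group_related_actions_alt (rest.dropWhile pvIsCont) := by
  rw [group_related_actions_alt]

-- A's loop with a nonempty current block c ends as: flush c extended by the leading
-- continuation run, then B's grouping of the remainder.
theorem pvFoldA_nonempty (xs : List String) :
    ∀ (g : List String) (c : List String), c ≠ [] →
    (let fin := xs.foldl pvStepA (g, c)
     if !fin.2.isEmpty then fin.1 ++ [PySem.Str.join "\n" fin.2] else fin.1) =
    g ++ PySem.Str.join "\n" (c ++ xs.takeWhile pvIsCont) ::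
        group_related_actions_alt (xs.dropWhile pvIsCont) := by
  induction xs with
  | nil =>
      intro g c hc
      simp [group_related_actions_alt, hc]
  | cons a rest ih =>
      intro g c hc
      by_cases ha : pvIsCont a = true
      · have hstep : pvStepA (g, c) a = (g, c ++ [a]) := by
          rw [pvStepA_eq]; simp [ha, hc]
        simp only [List.foldl_cons, hstep]
        rw [ih g (c ++ [a]) (by simp)]
        simp [ha]
      · have ha' : pvIsCont a = false := by simpa using ha
        have hstep : pvStepA (g, c) a = (g ++ [PySem.Str.join "\n" c], [a]) := by
          rw [pvStepA_eq]; simp [ha', hc]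
        simp only [List.foldl_cons, hstep]
        rw [ih _ [a] (by simp)]
        simp [ha', pvAlt_cons]

-- ===== VERDICT (by name: the statement is the Claim_ definition above) =====
theorem group_related_actions_spec : Claim_equal_group_related_actions := by
  intro actions _
  unfold Spec_group_related_actions group_related_actions
  match actions with
  | [] => simp [group_related_actions_alt]
  | a :: rest =>
      have hstep : pvStepA ([], []) a = ([], [a]) := by rw [pvStepA_eq]; simp
      simp only [List.foldl_cons, hstep]
      have := pvFoldA_nonempty rest [] [a] (by simp)
      simp only at this
      rw [this, pvAlt_cons]
      simp
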